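-- pv_equiv track=rewrite | github.com/Sadullayev-Javohir/Function | exercise9.py | AddRightDigit
-- ===== SOURCE A (Python) =====
-- def AddRightDigit(k):
--     add = []
--
--     for k in range(1, k + 1):
--         add.append(k)
--         kichik = min(add)
--         kichik += 1
--     add.insert(0, kichik)
--
--     return (add)
-- ===== SOURCE B (Python) =====
-- def AddRightDigit(k):
--     # Direct construction: A builds [1..k] and prepends min+1 = 2.
--     return [2] + list(range(1, k + 1))
-- ===== Notes on version B (the rewrite author's own statement) =====
-- stated objective: faster
-- what changed: B constructs [2]+list(range(1,k+1)) directly instead of A's loop that recomputes min(add) on every iteration.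
import Mathlib
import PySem

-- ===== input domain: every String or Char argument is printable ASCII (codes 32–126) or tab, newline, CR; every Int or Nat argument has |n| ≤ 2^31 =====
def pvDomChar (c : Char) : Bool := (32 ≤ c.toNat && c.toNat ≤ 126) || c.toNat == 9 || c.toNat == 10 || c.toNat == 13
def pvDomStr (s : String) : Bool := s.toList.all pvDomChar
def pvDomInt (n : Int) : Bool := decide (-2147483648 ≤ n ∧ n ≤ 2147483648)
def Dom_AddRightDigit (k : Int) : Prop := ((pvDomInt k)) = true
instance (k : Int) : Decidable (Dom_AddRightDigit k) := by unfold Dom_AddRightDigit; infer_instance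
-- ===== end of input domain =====

-- B replaces A's quadratic min-recomputing loop by directly building [2] ++ range(1,k+1); equal on k ≥ 1 (A raises NameError for k ≤ 0).

-- ===== PORT A =====
-- loop state: (add, kichik); kichik is Option Int because Python leaves it unassigned before the loop
def AddRightDigit (k : Int) : List Int :=
  let s := (PySem.List.pyRange 1 (k + 1) 1).foldl
    (fun (st : List Int × Option Int) i =>
      let add := st.1 ++ [i]
      let kichik := (PySem.List.min? add (fun x => x)).getD 0   -- add is nonempty here, getD never fires
      (add, some (kichik + 1))) ([], none)
  match s.2 with
  | some v => PySem.List.insert s.1 0 v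
  | none => s.1          -- Python raises NameError here (k ≤ 0); excluded by Pre_

-- ===== PORT B =====
def AddRightDigit_alt (k : Int) : List Int :=
  [2] ++ PySem.List.pyRange 1 (k + 1) 1

-- ===== PRECONDITION & SPEC =====
-- Pre_ excludes k ≤ 0, on which A raises NameError (kichik never assigned)
def Pre_AddRightDigit (k : Int) : Prop := 1 ≤ k
instance (k : Int) : Decidable (Pre_AddRightDigit k) := by unfold Pre_AddRightDigit; infer_instance
def pvWitness_AddRightDigit : Int := 3

def Spec_AddRightDigit (k : Int) (out : List Int) : Prop := out = AddRightDigit_alt k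
instance (k : Int) (out : List Int) : Decidable (Spec_AddRightDigit k out) := by unfold Spec_AddRightDigit; infer_instance

-- ===== CLAIM =====
def Claim_equal_AddRightDigit : Prop := ∀ (k : Int), Dom_AddRightDigit k → Pre_AddRightDigit k → Spec_AddRightDigit k (AddRightDigit k)

-- ===== LEMMAS AND PROOFS =====

theorem min?_of_one_mem (xs : List Int) (h1 : (1 : Int) ∈ xs) (hall : ∀ x ∈ xs, (1 : Int) ≤ x) :
    PySem.List.min? xs (fun x => x) = some 1 := by
  cases hmin : PySem.List.min? xs (fun x => x) with
  | none =>
    rw [PySem.List.min?_eq_none_iff] at hmin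
    subst hmin; simp at h1
  | some m =>
    have hm := PySem.List.min?_mem hmin
    have hle := PySem.List.min?_isMin hmin 1 h1
    have hge := hall m hm
    simp only [Option.some.injEq]
    omega

theorem loop_invariant (l : List Int) : ∀ (acc : List Int) (o : Option Int),
    (1 : Int) ∈ acc → (∀ x ∈ acc, (1 : Int) ≤ x) → (∀ x ∈ l, (1 : Int) ≤ x) →
    l.foldl (fun (st : List Int × Option Int) i =>
      let add := st.1 ++ [i]
      let kichik := (PySem.List.min? add (fun x => x)).getD 0
      (add, some (kichik + 1))) (acc, o) = (acc ++ l, if l = [] then o else some 2) := by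
  induction l with
  | nil => intro acc o _ _ _; simp
  | cons i t ih =>
    intro acc o h1 hacc hl
    simp only [List.foldl_cons]
    have hmem : (1 : Int) ∈ acc ++ [i] := List.mem_append_left _ h1
    have hallai : ∀ x ∈ acc ++ [i], (1 : Int) ≤ x := by
      intro x hx
      rcases List.mem_append.mp hx with h | h
      · exact hacc x h
      · simp only [List.mem_singleton] at h
        have h2 := hl _ (List.mem_cons_self (a := i) (l := t))
        omega
    rw [min?_of_one_mem _ hmem hallai]
    have := ih (acc ++ [i]) (some 2) hmem hallai (fun x hx => hl x (List.mem_cons_of_mem _ hx))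
    simp only [Option.getD_some] at this ⊢
    rw [show ((1 : Int) + 1) = 2 by norm_num, this]
    simp

-- ===== VERDICT =====
theorem AddRightDigit_spec : Claim_equal_AddRightDigit := by
  intro k _ hk
  unfold Pre_AddRightDigit at hk
  unfold Spec_AddRightDigit AddRightDigit AddRightDigit_alt
  have hcons : PySem.List.pyRange 1 (k + 1) 1 = 1 :: PySem.List.pyRange 2 (k + 1) 1 :=
    PySem.List.pyRange_one_cons (by omega)
  rw [hcons]
  simp only [List.foldl_cons, List.nil_append]
  rw [min?_of_one_mem [1] (by simp) (by simp)]
  simp only [Option.getD_some]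
  rw [show ((1 : Int) + 1) = 2 by norm_num]
  rw [loop_invariant _ [1] (some 2) (by simp) (by simp)
    (by intro x hx; rw [PySem.List.mem_pyRange_one] at hx; omega)]
  rw [ite_self]
  simp [PySem.List.insert_zero]
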